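-- pv_equiv track=rewrite | github.com/xkal36/Algorithms | Algorithms_and_Data_Structures/anagram.py | anagram_sol_1
-- ===== SOURCE A (Python) =====
-- def anagram_sol_1(s1, s2):
--     """
--     Checks to see that each character
--     in the first string occurs in the second.
--     Checking off a character is done
--     by replacing it with the value  None.
--     """
--
--     alist = list(s2)
--
--     pos1 = 0
--     stillOK = True
--
--     while pos1 < len(s1) and stillOK:
--         pos2 = 0
--         found = False
--         while pos2 < len(alist) and not found:
--             if s1[pos1] == alist[pos2]:
--                 found = True
--             else:
--                 pos2 = pos2 + 1
--
--         if found: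
--             alist[pos2] = None
--         else:
--             stillOK = False
--
--         pos1 = pos1 + 1
--
--     return stillOK
-- ===== SOURCE B (Python) =====
-- def anagram_sol_1(s1, s2):
--     counts = {}
--     for ch in s2:
--         counts[ch] = counts.get(ch, 0) + 1
--     for ch in s1:
--         n = counts.get(ch, 0)
--         if n == 0:
--             return False
--         counts[ch] = n - 1
--     return True
-- ===== Notes on version B (the rewrite author's own statement) =====
-- stated objective: faster
-- what changed: Replaces the quadratic check-off scan (inner rescan of s2's list for every char of s1) with a single counting pass: build a char->count dict from s2, then decrement per char of s1.
import Mathlib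
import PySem

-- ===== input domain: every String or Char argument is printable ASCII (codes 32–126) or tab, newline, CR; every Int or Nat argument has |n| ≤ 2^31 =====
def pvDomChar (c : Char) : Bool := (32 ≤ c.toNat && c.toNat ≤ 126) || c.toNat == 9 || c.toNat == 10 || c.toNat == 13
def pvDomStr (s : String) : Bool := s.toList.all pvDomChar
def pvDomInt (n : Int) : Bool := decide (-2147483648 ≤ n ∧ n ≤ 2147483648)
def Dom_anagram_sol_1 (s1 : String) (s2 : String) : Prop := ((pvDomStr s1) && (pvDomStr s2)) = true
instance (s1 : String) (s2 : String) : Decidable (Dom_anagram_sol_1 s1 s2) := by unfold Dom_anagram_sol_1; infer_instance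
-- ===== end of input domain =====

-- B replaces A's quadratic check-off scan with a single counting pass over a dict (asymptotically faster).


-- ===== PORT A =====
-- inner while loop: scan alist from pos2 = 0 for the first entry equal to s1[pos1]
def pvFindA (c : Char) : List (Option Char) → Option Nat
  | [] => none
  | x :: xs => if x = some c then some 0 else (pvFindA c xs).map (· + 1)

-- outer while loop: state is (remaining chars of s1, alist); 'found' → check off with None, else stillOK = False
def pvOuterA : List Char → List (Option Char) → Bool
  | [], _ => true
  | c :: cs, al =>
    match pvFindA c al with
    | some i => pvOuterA cs (al.set i none)
    | none => false

def anagram_sol_1 (s1 : String) (s2 : String) : Bool :=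
  pvOuterA s1.toList (s2.toList.map some)

-- ===== PORT B =====
-- second loop of Source B: consume one count per char of s1, early return False on a missing char
def pvConsumeB : List Char → PySem.Dict Char Int → Bool
  | [], _ => true
  | c :: cs, d =>
    let n := d.getD c 0
    if n == 0 then false else pvConsumeB cs (d.insert c (n - 1))

def anagram_sol_1_alt (s1 : String) (s2 : String) : Bool :=
  let counts := s2.toList.foldl (fun d c => d.insert c (d.getD c 0 + 1)) PySem.Dict.empty
  pvConsumeB s1.toList counts

-- ===== PRECONDITION & SPEC =====
def Spec_anagram_sol_1 (s1 : String) (s2 : String) (out : Bool) : Prop := out = anagram_sol_1_alt s1 s2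
instance (s1 : String) (s2 : String) (out : Bool) : Decidable (Spec_anagram_sol_1 s1 s2 out) := by unfold Spec_anagram_sol_1; infer_instance

-- ===== CLAIM (what is proved, stated in full; the proofs are below) =====
def Claim_equal_anagram_sol_1 : Prop := ∀ (s1 : String) (s2 : String), Dom_anagram_sol_1 s1 s2 → Spec_anagram_sol_1 s1 s2 (anagram_sol_1 s1 s2)

-- ===== LEMMAS AND PROOFS =====

-- the inner scan fails exactly when the char has no remaining occurrence
lemma pvFindA_eq_none_iff (c : Char) (al : List (Option Char)) :
    pvFindA c al = none ↔ al.count (some c) = 0 := by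
  induction al with
  | nil => simp [pvFindA]
  | cons x xs ih =>
    by_cases hx : x = some c
    · simp [pvFindA, hx]
    · simp [pvFindA, hx, Option.map_eq_none_iff, ih]

-- checking off the found position removes exactly one occurrence of c and nothing else
lemma pvFindA_set_count (c c' : Char) (al : List (Option Char)) (i : Nat)
    (h : pvFindA c al = some i) :
    (al.set i none).count (some c') = al.count (some c') - (if c' = c then 1 else 0) := by
  induction al generalizing i with
  | nil => simp [pvFindA] at h
  | cons x xs ih =>
    by_cases hx : x = some c
    · subst hx
      simp [pvFindA] at h
      subst h
      by_cases hc : c' = c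
      · simp [hc]
      · have hc2 : ¬ c = c' := fun h => hc h.symm
        simp [hc, hc2]
    · simp only [pvFindA, if_neg hx, Option.map_eq_some_iff] at h
      obtain ⟨j, hj, rfl⟩ := h
      have hxs := ih j hj
      have hcnt0 : xs.count (some c) ≠ 0 := by
        intro h0
        rw [← pvFindA_eq_none_iff] at h0
        simp [h0] at hj
      by_cases hc : c' = c <;>
        simp_all [List.count_cons, List.set]

-- the two loops agree whenever the dict counts the remaining alist occurrences
lemma outer_eq_consume (cs : List Char) (al : List (Option Char)) (d : PySem.Dict Char Int)
    (hinv : ∀ c : Char, d.getD c 0 = (al.count (some c) : Int)) :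
    pvOuterA cs al = pvConsumeB cs d := by
  induction cs generalizing al d with
  | nil => simp [pvOuterA, pvConsumeB]
  | cons c cs ih =>
    cases hfind : pvFindA c al with
    | none =>
      have h0 : al.count (some c) = 0 := (pvFindA_eq_none_iff c al).mp hfind
      have : d.getD c 0 = 0 := by rw [hinv c, h0]; rfl
      simp [pvOuterA, pvConsumeB, hfind, this]
    | some i =>
      have hpos : al.count (some c) ≠ 0 := by
        intro h0
        rw [← pvFindA_eq_none_iff] at h0
        simp [h0] at hfind
      have hne : d.getD c 0 ≠ 0 := by
        rw [hinv c]; exact_mod_cast hpos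
      have hstep := ih (al.set i none) (d.insert c (d.getD c 0 - 1)) ?_
      · simpa [pvOuterA, pvConsumeB, hfind, hne] using hstep
      · intro c'
        rw [PySem.Dict.getD_insert, pvFindA_set_count c c' al i hfind, hinv c']
        by_cases hc : c' = c
        · subst hc
          have hlt : 0 < al.count (some c') := Nat.pos_of_ne_zero hpos
          rw [if_pos rfl, if_pos rfl, hinv c']
          omega
        · simp [hc]

-- ===== VERDICT (by name: the statement is the Claim_ definition above) =====
theorem anagram_sol_1_spec : Claim_equal_anagram_sol_1 := by
  intro s1 s2 _
  unfold Spec_anagram_sol_1 anagram_sol_1 anagram_sol_1_alt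
  apply outer_eq_consume
  intro c
  rw [PySem.Dict.getD_foldl_insert_add_one, PySem.Dict.getD_empty,
    List.count_map_of_injective _ some (fun _ _ => Option.some.inj)]
  simp
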